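-- pv_equiv track=rewrite | github.com/SpinTillYouWin-WheelPulsePro/WheelPulsePro_LatestVersion_Working | tests/test_audit.py | _compute_drought
-- ===== SOURCE A (Python) =====
-- def _compute_drought(spins, cat):
--     """Replicate the drought algorithm from app.py _update_drought_counters_inner.
--
--     Scans spins in reverse; returns the count of trailing spins where the
--     given category did NOT hit.
--     """
--     _DOZEN_RANGES = {
--         "1st Dozen": range(1, 13),
--         "2nd Dozen": range(13, 25),
--         "3rd Dozen": range(25, 37),
--     }
--     _COL_NUMS = {
--         "1st Column": {1, 4, 7, 10, 13, 16, 19, 22, 25, 28, 31, 34},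
--         "2nd Column": {2, 5, 8, 11, 14, 17, 20, 23, 26, 29, 32, 35},
--         "3rd Column": {3, 6, 9, 12, 15, 18, 21, 24, 27, 30, 33, 36},
--     }
--     _RED = {1, 3, 5, 7, 9, 12, 14, 16, 18, 19, 21, 23, 25, 27, 30, 32, 34, 36}
--     _BLACK = {2, 4, 6, 8, 10, 11, 13, 15, 17, 20, 22, 24, 26, 28, 29, 31, 33, 35}
--
--     def _hits(n, cat):
--         if cat in _DOZEN_RANGES:
--             return n in _DOZEN_RANGES[cat]
--         if cat in _COL_NUMS:
--             return n in _COL_NUMS[cat]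
--         if cat == "Red":
--             return n in _RED
--         if cat == "Black":
--             return n in _BLACK
--         if cat == "Even":
--             return n != 0 and n % 2 == 0
--         if cat == "Odd":
--             return n != 0 and n % 2 == 1
--         if cat == "Low":
--             return 1 <= n <= 18
--         if cat == "High":
--             return 19 <= n <= 36
--         return False
--
--     d = 0
--     for spin_str in reversed(spins):
--         try:
--             num = int(spin_str)
--         except (ValueError, TypeError):
--             d += 1
--             continue
--         if not (0 <= num <= 36):
--             d += 1
--             continue
--         if _hits(num, cat):
--             break
--         d += 1
--     return d
-- ===== SOURCE B (Python) =====
-- def _compute_drought(spins, cat):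
--     """Closed form: drought = len(spins) - 1 - (index of the last hit),
--     with the category's hit numbers precomputed once as an arithmetic set."""
--     _RED = {1, 3, 5, 7, 9, 12, 14, 16, 18, 19, 21, 23, 25, 27, 30, 32, 34, 36}
--     _DOZEN_BASE = {"1st Dozen": 1, "2nd Dozen": 13, "3rd Dozen": 25}
--     _COL_REM = {"1st Column": 1, "2nd Column": 2, "3rd Column": 0}
--
--     if cat in _DOZEN_BASE:
--         b = _DOZEN_BASE[cat]
--         hit_set = set(range(b, b + 12))
--     elif cat in _COL_REM:
--         hit_set = {n for n in range(1, 37) if n % 3 == _COL_REM[cat]}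
--     elif cat == "Red":
--         hit_set = _RED
--     elif cat == "Black":
--         hit_set = set(range(1, 37)) - _RED
--     elif cat == "Even":
--         hit_set = set(range(2, 37, 2))
--     elif cat == "Odd":
--         hit_set = set(range(1, 37, 2))
--     elif cat == "Low":
--         hit_set = set(range(1, 19))
--     elif cat == "High":
--         hit_set = set(range(19, 37))
--     else:
--         hit_set = set()
--
--     last = -1
--     for i, s in enumerate(spins):
--         try:
--             n = int(s)
--         except (ValueError, TypeError):
--             continue
--         if n in hit_set:
--             last = i
--     return len(spins) - 1 - last
-- ===== Notes on version B (the rewrite author's own statement) =====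
-- stated objective: alternative
-- what changed: Replaces A's reverse scan with per-spin branchy classification by a closed form: the category's hit-number set is precomputed once from arithmetic (dozen base ranges, column residues mod 3, Black as 1..36 minus Red, even/odd strides), then one forward pass records the index of the last hit and the result is len(spins) - 1 - last.
import Mathlib
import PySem

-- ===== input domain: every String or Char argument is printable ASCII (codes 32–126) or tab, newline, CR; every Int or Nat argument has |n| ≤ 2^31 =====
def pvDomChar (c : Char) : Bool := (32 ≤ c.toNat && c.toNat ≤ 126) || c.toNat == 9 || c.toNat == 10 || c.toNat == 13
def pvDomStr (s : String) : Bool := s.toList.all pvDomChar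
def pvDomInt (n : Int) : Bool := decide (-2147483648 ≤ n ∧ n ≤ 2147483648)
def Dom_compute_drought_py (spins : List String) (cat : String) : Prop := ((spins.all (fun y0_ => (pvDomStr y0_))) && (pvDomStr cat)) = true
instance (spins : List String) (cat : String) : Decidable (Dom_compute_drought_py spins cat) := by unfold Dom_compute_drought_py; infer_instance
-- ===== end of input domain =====

-- B replaces A's reverse scan with branchy per-spin classification by a precomputed
-- arithmetic hit set plus a forward last-hit-index pass and a closed form (alternative).

-- ===== PORT A =====
def pvDozenRanges : PySem.Dict String (List Int) := PySem.Dict.ofList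
  [("1st Dozen", PySem.List.pyRange 1 13 1),
   ("2nd Dozen", PySem.List.pyRange 13 25 1),
   ("3rd Dozen", PySem.List.pyRange 25 37 1)]
def pvColNums : PySem.Dict String (PySem.Set Int) := PySem.Dict.ofList
  [("1st Column", PySem.Set.ofList [1, 4, 7, 10, 13, 16, 19, 22, 25, 28, 31, 34]),
   ("2nd Column", PySem.Set.ofList [2, 5, 8, 11, 14, 17, 20, 23, 26, 29, 32, 35]),
   ("3rd Column", PySem.Set.ofList [3, 6, 9, 12, 15, 18, 21, 24, 27, 30, 33, 36])]
def pvRed : PySem.Set Int := PySem.Set.ofList [1, 3, 5, 7, 9, 12, 14, 16, 18, 19, 21, 23, 25, 27, 30, 32, 34, 36]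
def pvBlack : PySem.Set Int := PySem.Set.ofList [2, 4, 6, 8, 10, 11, 13, 15, 17, 20, 22, 24, 26, 28, 29, 31, 33, 35]

def pvHits (n : Int) (cat : String) : Bool :=
  match pvDozenRanges.get? cat with
  | some r => r.contains n
  | none =>
  match pvColNums.get? cat with
  | some s => PySem.Set.contains s n
  | none =>
  if cat == "Red" then PySem.Set.contains pvRed n
  else if cat == "Black" then PySem.Set.contains pvBlack n
  else if cat == "Even" then n != 0 && PySem.Int.mod n 2 == 0
  else if cat == "Odd" then n != 0 && PySem.Int.mod n 2 == 1
  else if cat == "Low" then 1 ≤ n && n ≤ 18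
  else if cat == "High" then 19 ≤ n && n ≤ 36
  else false

-- the for-loop over reversed(spins) with its accumulator d and break
def pvALoop (cat : String) (d : Int) : List String → Int
  | [] => d
  | spin_str :: rest =>
    match PySem.Int.ofStr? spin_str with
    | none => pvALoop cat (d + 1) rest            -- except ValueError: d += 1; continue
    | some num =>
      if !(0 ≤ num && num ≤ 36) then pvALoop cat (d + 1) rest
      else if pvHits num cat then d               -- break
      else pvALoop cat (d + 1) rest

def compute_drought_py (spins : List String) (cat : String) : Int :=
  pvALoop cat 0 spins.reverse

-- ===== PORT B =====
def pvBRed : PySem.Set Int := PySem.Set.ofList [1, 3, 5, 7, 9, 12, 14, 16, 18, 19, 21, 23, 25, 27, 30, 32, 34, 36]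
def pvDozenBase : PySem.Dict String Int := PySem.Dict.ofList
  [("1st Dozen", 1), ("2nd Dozen", 13), ("3rd Dozen", 25)]
def pvColRem : PySem.Dict String Int := PySem.Dict.ofList
  [("1st Column", 1), ("2nd Column", 2), ("3rd Column", 0)]

def pvHitSet (cat : String) : PySem.Set Int :=
  match pvDozenBase.get? cat with
  | some b => PySem.Set.ofList (PySem.List.pyRange b (b + 12) 1)
  | none =>
  match pvColRem.get? cat with
  | some r => PySem.Set.ofList ((PySem.List.pyRange 1 37 1).filter (fun n => PySem.Int.mod n 3 == r))
  | none =>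
  if cat == "Red" then pvBRed
  else if cat == "Black" then PySem.Set.diff (PySem.Set.ofList (PySem.List.pyRange 1 37 1)) pvBRed
  else if cat == "Even" then PySem.Set.ofList (PySem.List.pyRange 2 37 2)
  else if cat == "Odd" then PySem.Set.ofList (PySem.List.pyRange 1 37 2)
  else if cat == "Low" then PySem.Set.ofList (PySem.List.pyRange 1 19 1)
  else if cat == "High" then PySem.Set.ofList (PySem.List.pyRange 19 37 1)
  else PySem.Set.empty

def compute_drought_py_alt (spins : List String) (cat : String) : Int :=
  let hs := pvHitSet cat
  let last := (PySem.List.enumerate spins).foldl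
    (fun last p =>
      match PySem.Int.ofStr? p.2 with
      | none => last
      | some n => if PySem.Set.contains hs n then p.1 else last) (-1 : Int)
  (spins.length : Int) - 1 - last

-- ===== PRECONDITION & SPEC =====
def Spec_compute_drought_py (spins : List String) (cat : String) (out : Int) : Prop := out = compute_drought_py_alt spins cat
instance (spins : List String) (cat : String) (out : Int) : Decidable (Spec_compute_drought_py spins cat out) := by unfold Spec_compute_drought_py; infer_instance

-- ===== CLAIM =====
def Claim_equal_compute_drought_py : Prop := ∀ (spins : List String) (cat : String), Dom_compute_drought_py spins cat → Spec_compute_drought_py spins cat (compute_drought_py spins cat)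

-- ===== LEMMAS AND PROOFS =====

-- A's per-spin hit classification, abstracted for the proofs
def pvIsHit (cat : String) (s : String) : Bool :=
  match PySem.Int.ofStr? s with
  | none => false
  | some num => if !(0 ≤ num && num ≤ 36) then false else pvHits num cat

-- a dict lookup misses when the key matches no entry
lemma pvGet_none {ν : Type} (d : PySem.Dict String ν) (cat : String)
    (h : ∀ p ∈ d.items, p.1 ≠ cat) : d.get? cat = none := by
  have hf : List.find? (fun p => p.1 == cat) d.items = none := by
    rw [List.find?_eq_none]
    intro p hp
    simpa [beq_iff_eq] using h p hp
  simp [PySem.Dict.get?, hf]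

-- the precomputed set contains exactly A's hits within 0..36
lemma pvHitSet_correct (cat : String) (n : Int) :
    PySem.Set.contains (pvHitSet cat) n = ((0 ≤ n && n ≤ 36) && pvHits n cat) := by
  rw [Bool.eq_iff_iff]
  by_cases e1 : cat = "1st Dozen"
  · subst e1
    have hA : pvHits n "1st Dozen" = (PySem.List.pyRange 1 13 1).contains n := rfl
    have hB : pvHitSet "1st Dozen" = PySem.Set.ofList (PySem.List.pyRange 1 13 1) := rfl
    simp only [hA, hB]
    simp [PySem.Set.contains, PySem.Set.mem_ofList, PySem.List.mem_pyRange_one]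
    omega
  by_cases e2 : cat = "2nd Dozen"
  · subst e2
    have hA : pvHits n "2nd Dozen" = (PySem.List.pyRange 13 25 1).contains n := rfl
    have hB : pvHitSet "2nd Dozen" = PySem.Set.ofList (PySem.List.pyRange 13 25 1) := rfl
    simp only [hA, hB]
    simp [PySem.Set.contains, PySem.Set.mem_ofList, PySem.List.mem_pyRange_one]
    omega
  by_cases e3 : cat = "3rd Dozen"
  · subst e3
    have hA : pvHits n "3rd Dozen" = (PySem.List.pyRange 25 37 1).contains n := rfl
    have hB : pvHitSet "3rd Dozen" = PySem.Set.ofList (PySem.List.pyRange 25 37 1) := rfl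
    simp only [hA, hB]
    simp [PySem.Set.contains, PySem.Set.mem_ofList, PySem.List.mem_pyRange_one]
    omega
  by_cases e4 : cat = "1st Column"
  · subst e4
    have hA : pvHits n "1st Column"
        = PySem.Set.contains (PySem.Set.ofList [1, 4, 7, 10, 13, 16, 19, 22, 25, 28, 31, 34]) n := rfl
    have hB : pvHitSet "1st Column"
        = PySem.Set.ofList ((PySem.List.pyRange 1 37 1).filter (fun m => PySem.Int.mod m 3 == 1)) := rfl
    simp only [hA, hB]
    simp [PySem.Set.contains, PySem.Set.mem_ofList, List.mem_filter,
          PySem.List.mem_pyRange_one, beq_iff_eq]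
    omega
  by_cases e5 : cat = "2nd Column"
  · subst e5
    have hA : pvHits n "2nd Column"
        = PySem.Set.contains (PySem.Set.ofList [2, 5, 8, 11, 14, 17, 20, 23, 26, 29, 32, 35]) n := rfl
    have hB : pvHitSet "2nd Column"
        = PySem.Set.ofList ((PySem.List.pyRange 1 37 1).filter (fun m => PySem.Int.mod m 3 == 2)) := rfl
    simp only [hA, hB]
    simp [PySem.Set.contains, PySem.Set.mem_ofList, List.mem_filter,
          PySem.List.mem_pyRange_one, beq_iff_eq]
    omega
  by_cases e6 : cat = "3rd Column"
  · subst e6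
    have hA : pvHits n "3rd Column"
        = PySem.Set.contains (PySem.Set.ofList [3, 6, 9, 12, 15, 18, 21, 24, 27, 30, 33, 36]) n := rfl
    have hB : pvHitSet "3rd Column"
        = PySem.Set.ofList ((PySem.List.pyRange 1 37 1).filter (fun m => PySem.Int.mod m 3 == 0)) := rfl
    simp only [hA, hB]
    simp [PySem.Set.contains, PySem.Set.mem_ofList, List.mem_filter,
          PySem.List.mem_pyRange_one, beq_iff_eq]
    omega
  -- beyond the two dicts both sides fall through to the string-equality chains
  have hDR : pvDozenRanges.get? cat = none := by
    refine pvGet_none _ _ ?_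
    intro p hp
    have : pvDozenRanges.items.map Prod.fst = ["1st Dozen", "2nd Dozen", "3rd Dozen"] := by decide
    have hp1 : p.1 ∈ pvDozenRanges.items.map Prod.fst := List.mem_map_of_mem hp
    rw [this] at hp1
    simp only [List.mem_cons, List.not_mem_nil, or_false] at hp1
    rcases hp1 with h | h | h <;> simp [h, e1, e2, e3, Ne.symm]
  have hCN : pvColNums.get? cat = none := by
    refine pvGet_none _ _ ?_
    intro p hp
    have : pvColNums.items.map Prod.fst = ["1st Column", "2nd Column", "3rd Column"] := by decide
    have hp1 : p.1 ∈ pvColNums.items.map Prod.fst := List.mem_map_of_mem hp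
    rw [this] at hp1
    simp only [List.mem_cons, List.not_mem_nil, or_false] at hp1
    rcases hp1 with h | h | h <;> simp [h, e4, e5, e6, Ne.symm]
  have hDB : pvDozenBase.get? cat = none := by
    refine pvGet_none _ _ ?_
    intro p hp
    have : pvDozenBase.items.map Prod.fst = ["1st Dozen", "2nd Dozen", "3rd Dozen"] := by decide
    have hp1 : p.1 ∈ pvDozenBase.items.map Prod.fst := List.mem_map_of_mem hp
    rw [this] at hp1
    simp only [List.mem_cons, List.not_mem_nil, or_false] at hp1
    rcases hp1 with h | h | h <;> simp [h, e1, e2, e3, Ne.symm]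
  have hCR : pvColRem.get? cat = none := by
    refine pvGet_none _ _ ?_
    intro p hp
    have : pvColRem.items.map Prod.fst = ["1st Column", "2nd Column", "3rd Column"] := by decide
    have hp1 : p.1 ∈ pvColRem.items.map Prod.fst := List.mem_map_of_mem hp
    rw [this] at hp1
    simp only [List.mem_cons, List.not_mem_nil, or_false] at hp1
    rcases hp1 with h | h | h <;> simp [h, e4, e5, e6, Ne.symm]
  by_cases e7 : cat = "Red"
  · subst e7
    simp only [pvHits, pvHitSet, hDR, hCN, hDB, hCR]
    simp [PySem.Set.contains, pvRed, pvBRed, PySem.Set.mem_ofList]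
    omega
  by_cases e8 : cat = "Black"
  · subst e8
    simp only [pvHits, pvHitSet, hDR, hCN, hDB, hCR]
    simp [PySem.Set.contains, pvBlack, pvBRed, PySem.Set.mem_diff,
          PySem.Set.mem_ofList, PySem.List.mem_pyRange_one]
    omega
  by_cases e9 : cat = "Even"
  · subst e9
    simp only [pvHits, pvHitSet, hDR, hCN, hDB, hCR]
    rw [show ((("Even":String) == "Red") = false) by decide,
        show ((("Even":String) == "Black") = false) by decide]
    simp [PySem.Set.contains, PySem.Set.mem_ofList,
          PySem.List.mem_pyRange_iff_of_pos (a := 2) (b := 37) (s := 2) (by norm_num)]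
    omega
  by_cases e10 : cat = "Odd"
  · subst e10
    simp only [pvHits, pvHitSet, hDR, hCN, hDB, hCR]
    rw [show ((("Odd":String) == "Red") = false) by decide,
        show ((("Odd":String) == "Black") = false) by decide,
        show ((("Odd":String) == "Even") = false) by decide]
    simp [PySem.Set.contains, PySem.Set.mem_ofList,
          PySem.List.mem_pyRange_iff_of_pos (a := 1) (b := 37) (s := 2) (by norm_num)]
    omega
  by_cases e11 : cat = "Low"
  · subst e11
    simp only [pvHits, pvHitSet, hDR, hCN, hDB, hCR]
    rw [show ((("Low":String) == "Red") = false) by decide,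
        show ((("Low":String) == "Black") = false) by decide,
        show ((("Low":String) == "Even") = false) by decide,
        show ((("Low":String) == "Odd") = false) by decide]
    simp [PySem.Set.contains, PySem.Set.mem_ofList, PySem.List.mem_pyRange_one]
    omega
  by_cases e12 : cat = "High"
  · subst e12
    simp only [pvHits, pvHitSet, hDR, hCN, hDB, hCR]
    rw [show ((("High":String) == "Red") = false) by decide,
        show ((("High":String) == "Black") = false) by decide,
        show ((("High":String) == "Even") = false) by decide,
        show ((("High":String) == "Odd") = false) by decide,
        show ((("High":String) == "Low") = false) by decide]
    simp [PySem.Set.contains, PySem.Set.mem_ofList, PySem.List.mem_pyRange_one]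
    omega
  · simp only [pvHits, pvHitSet, hDR, hCN, hDB, hCR]
    simp [PySem.Set.contains, PySem.Set.empty, e7, e8, e9, e10, e11, e12]

lemma pvALoop_cons' (cat : String) (d : Int) (x : String) (xs : List String) :
    pvALoop cat d (x :: xs) =
      if pvIsHit cat x then d else pvALoop cat (d + 1) xs := by
  rcases hx : PySem.Int.ofStr? x with _ | num
  · simp [pvALoop, pvIsHit, hx]
  · simp only [pvALoop, pvIsHit, hx]
    split_ifs <;> simp_all

lemma pvALoop_shift (cat : String) (l : List String) (d : Int) :
    pvALoop cat d l = d + pvALoop cat 0 l := by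
  induction l generalizing d with
  | nil => simp [pvALoop]
  | cons x xs ih =>
    rw [pvALoop_cons', pvALoop_cons']
    split_ifs
    · ring
    · rw [ih (d + 1), ih (0 + 1)]; ring

-- B's last-hit fold, named for the proofs
def pvLast (cat : String) (l : List (Int × String)) (a : Int) : Int :=
  l.foldl (fun last p =>
      match PySem.Int.ofStr? p.2 with
      | none => last
      | some n => if PySem.Set.contains (pvHitSet cat) n then p.1 else last) a

lemma pvB_eq (spins : List String) (cat : String) :
    compute_drought_py_alt spins cat
      = (spins.length : Int) - 1 - pvLast cat (PySem.List.enumerate spins) (-1) := rfl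

lemma pvLast_append (cat : String) (e : List (Int × String)) (k : Int) (x : String) (a : Int) :
    pvLast cat (e ++ [(k, x)]) a = if pvIsHit cat x then k else pvLast cat e a := by
  unfold pvLast
  rw [List.foldl_append]
  rcases hx : PySem.Int.ofStr? x with _ | num
  · simp [pvIsHit, hx]
  · simp only [List.foldl, pvIsHit, hx, pvHitSet_correct]
    by_cases h1 : (0 ≤ num && num ≤ 36) = true <;> by_cases h2 : pvHits num cat = true <;>
      simp [h1, h2]

lemma pvAB (spins : List String) (cat : String) :
    pvALoop cat 0 spins.reverse
      = (spins.length : Int) - 1 - pvLast cat (PySem.List.enumerate spins) (-1) := by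
  induction spins using List.reverseRecOn with
  | nil => simp [pvALoop, pvLast, PySem.List.enumerate_nil]
  | append_singleton l x ih =>
    rw [List.reverse_append, List.reverse_singleton, List.singleton_append, pvALoop_cons']
    have he : PySem.List.enumerate (l ++ [x])
        = PySem.List.enumerate l ++ [((l.length : Int), x)] := by
      rw [PySem.List.enumerate_append]
      simp [PySem.List.enumerate_cons, PySem.List.enumerate_nil]
    rw [he, pvLast_append]
    split_ifs
    · simp
    · rw [pvALoop_shift, ih]
      simp only [List.length_append, List.length_singleton]
      push_cast
      ring

-- ===== VERDICT =====
theorem compute_drought_py_spec : Claim_equal_compute_drought_py := by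
  intro spins cat _
  show _ = compute_drought_py_alt spins cat
  rw [pvB_eq]
  exact pvAB spins cat
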